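-- pv_equiv track=rewrite | github.com/primrose101/CS322 | finite_state_machines/keywords.py | kwstart_fsm
-- ===== SOURCE A (Python) =====
-- def kwstart_fsm(string_input, index):
--     i = index
--
--     table = [
--         [1, 6, 6, 6, 6, 6],
--         [6, 2, 6, 6, 6, 6],
--         [6, 6, 3, 6, 6, 6],
--         [6, 6, 6, 4, 6, 6],
--         [6, 5, 6, 6, 6, 6],
--         [6, 6, 6, 6, 6, 6],
--         [6, 6, 6, 6, 6, 6],
--     ]
--
--     state = 0
--     inputstate = 0
--
--     string_length = len(string_input)
--
--     while i != string_length: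
--         if string_input[i] == 'S':
--             inputstate = 0
--         elif string_input[i] == 'T':
--             inputstate = 1
--         elif string_input[i] == 'A':
--             inputstate = 2
--         elif string_input[i] == 'R':
--             inputstate = 3
--         elif string_input[i] == 'T':
--             inputstate = 4
--         else:
--             inputstate = 5
--
--         state = table[state][inputstate]
--
--         if state == 6:
--             break
--
--         i += 1
--
--     return i - index
-- ===== SOURCE B (Python) =====
-- def kwstart_fsm(string_input, index):
--     keyword = "START"
--     n = len(string_input)
--     i = index
--     while i != n and (i - index) < 5 and string_input[i] == keyword[i - index]:
--         i += 1
--     return i - index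
-- ===== Notes on version B (the rewrite author's own statement) =====
-- stated objective: simpler
-- what changed: Replaced the 7x6 DFA transition table and the if/elif input-classification cascade with a direct character-by-character comparison of the string against the literal keyword "START", capped at 5 matches.
-- outside the precondition, e.g. on kwstart_fsm('abc', 7): A raises IndexError, B raises IndexError; on kwstart_fsm('abc', -9): A raises IndexError, B raises IndexError
import Mathlib
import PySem

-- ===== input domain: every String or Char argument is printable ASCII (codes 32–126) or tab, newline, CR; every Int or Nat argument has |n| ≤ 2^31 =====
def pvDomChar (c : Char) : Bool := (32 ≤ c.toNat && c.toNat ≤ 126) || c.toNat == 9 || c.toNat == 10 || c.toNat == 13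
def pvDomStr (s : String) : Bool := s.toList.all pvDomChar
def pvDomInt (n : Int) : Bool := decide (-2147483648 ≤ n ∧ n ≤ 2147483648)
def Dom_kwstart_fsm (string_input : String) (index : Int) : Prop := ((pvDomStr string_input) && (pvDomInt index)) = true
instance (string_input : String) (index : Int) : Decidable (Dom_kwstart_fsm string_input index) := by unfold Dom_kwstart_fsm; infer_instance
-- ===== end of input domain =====

-- B replaces A's transition table and state-classification cascade by a direct
-- character-by-character comparison against the literal keyword "START" (objective: simpler).

-- ===== PORT A =====
-- the transition table A builds at the top of the function
def kwA_table : List (List Nat) :=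
  [ [1, 6, 6, 6, 6, 6],
    [6, 2, 6, 6, 6, 6],
    [6, 6, 3, 6, 6, 6],
    [6, 6, 6, 4, 6, 6],
    [6, 5, 6, 6, 6, 6],
    [6, 6, 6, 6, 6, 6],
    [6, 6, 6, 6, 6, 6] ]

-- A's if/elif cascade computing inputstate from the current character
-- (kept exactly as written, including the duplicated — unreachable — 'T' branch)
def kwA_inputstate (ch : Char) : Nat :=
  if ch = 'S' then 0
  else if ch = 'T' then 1
  else if ch = 'A' then 2
  else if ch = 'R' then 3
  else if ch = 'T' then 4
  else 5

-- A's while loop; fuel only guards termination (never reached before i = n inside Pre_).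
-- pyGet? = none is where Python's string_input[i] raises IndexError (outside Pre_).
def kwA_loop (cs : List Char) (n : Int) (table : List (List Nat)) (index : Int)
    (i : Int) (state : Nat) : Nat → Int
  | 0 => i - index
  | fuel + 1 =>
    if i = n then i - index
    else
      match PySem.List.pyGet? cs i with
      | none => i - index
      | some ch =>
        let state' := (table.getD state []).getD (kwA_inputstate ch) 6
        if state' = 6 then i - index
        else kwA_loop cs n table index (i + 1) state' fuel

def kwstart_fsm (string_input : String) (index : Int) : Int :=
  let i := index
  let table := kwA_table
  let state : Nat := 0
  let string_length := PySem.Str.len string_input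
  kwA_loop string_input.toList string_length table index i state
    ((string_length - i).toNat + 1)

-- ===== PORT B =====
-- B's while loop: i != n and (i - index) < 5 and string_input[i] == keyword[i - index]
-- pyGet? cs i = none is where B's Python raises IndexError (outside Pre_).
def kwB_loop (cs kw : List Char) (n index : Int) (i : Int) : Nat → Int
  | 0 => i - index
  | fuel + 1 =>
    if i = n then i - index
    else if i - index < 5 then
      match PySem.List.pyGet? cs i, PySem.List.pyGet? kw (i - index) with
      | some a, some b =>
        if a = b then kwB_loop cs kw n index (i + 1) fuel else i - index
      | _, _ => i - index
    else i - index

def kwstart_fsm_alt (string_input : String) (index : Int) : Int :=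
  let keyword := "START"
  let n := PySem.Str.len string_input
  kwB_loop string_input.toList keyword.toList n index index ((n - index).toNat + 1)

-- ===== PRECONDITION & SPEC =====
-- A raises IndexError exactly when index < -len or index > len; those inputs are excluded.
def Pre_kwstart_fsm (string_input : String) (index : Int) : Prop :=
  -(PySem.Str.len string_input) ≤ index ∧ index ≤ PySem.Str.len string_input
instance (string_input : String) (index : Int) : Decidable (Pre_kwstart_fsm string_input index) := by
  unfold Pre_kwstart_fsm; infer_instance
def pvWitness_kwstart_fsm : String × Int := ("START here", 0)

def Spec_kwstart_fsm (string_input : String) (index : Int) (out : Int) : Prop := out = kwstart_fsm_alt string_input index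
instance (string_input : String) (index : Int) (out : Int) : Decidable (Spec_kwstart_fsm string_input index out) := by unfold Spec_kwstart_fsm; infer_instance

-- ===== CLAIM (what is proved, stated in full; the proofs are below) =====
def Claim_equal_kwstart_fsm : Prop := ∀ (string_input : String) (index : Int), Dom_kwstart_fsm string_input index → Pre_kwstart_fsm string_input index → Spec_kwstart_fsm string_input index (kwstart_fsm string_input index)

-- ===== LEMMAS AND PROOFS =====

-- A's row for the accepting state 5 sends every input class to the dead state 6
lemma kwA_step5 (ch : Char) : (kwA_table.getD 5 []).getD (kwA_inputstate ch) 6 = 6 := by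
  simp only [kwA_table, kwA_inputstate]
  split_ifs <;> rfl

-- in state k < 5, A's table moves to k+1 on the k-th keyword character and to 6 otherwise
lemma kwA_step0 (ch : Char) (hc : ch ≠ 'S') : (kwA_table.getD 0 []).getD (kwA_inputstate ch) 6 = 6 := by
  simp only [kwA_table, kwA_inputstate]; split_ifs <;> first | rfl | exact absurd ‹ch = 'S'› hc
lemma kwA_step1 (ch : Char) (hc : ch ≠ 'T') : (kwA_table.getD 1 []).getD (kwA_inputstate ch) 6 = 6 := by
  simp only [kwA_table, kwA_inputstate]; split_ifs <;> first | rfl | exact absurd ‹ch = 'T'› hc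
lemma kwA_step2 (ch : Char) (hc : ch ≠ 'A') : (kwA_table.getD 2 []).getD (kwA_inputstate ch) 6 = 6 := by
  simp only [kwA_table, kwA_inputstate]; split_ifs <;> first | rfl | exact absurd ‹ch = 'A'› hc
lemma kwA_step3 (ch : Char) (hc : ch ≠ 'R') : (kwA_table.getD 3 []).getD (kwA_inputstate ch) 6 = 6 := by
  simp only [kwA_table, kwA_inputstate]; split_ifs <;> first | rfl | exact absurd ‹ch = 'R'› hc
lemma kwA_step4 (ch : Char) (hc : ch ≠ 'T') : (kwA_table.getD 4 []).getD (kwA_inputstate ch) 6 = 6 := by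
  simp only [kwA_table, kwA_inputstate]; split_ifs <;> first | rfl | exact absurd ‹ch = 'T'› hc

-- lockstep equivalence of the two loops at the same fuel:
-- A's state always equals the number of characters matched so far, i - index
lemma kw_loop_eq (cs : List Char) (n index : Int) :
    ∀ (fuel : Nat) (i : Int) (state : Nat),
      0 ≤ i - index → i - index ≤ 5 → state = (i - index).toNat →
      kwA_loop cs n kwA_table index i state fuel
        = kwB_loop cs ("START".toList) n index i fuel := by
  intro fuel
  induction fuel with
  | zero => intro i state _ _ _; rfl
  | succ f ih =>
    intro i state h0 h5 hs
    rw [kwA_loop, kwB_loop]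
    by_cases hi : i = n
    · simp [hi]
    simp only [hi, if_false]
    cases hget : PySem.List.pyGet? cs i with
    | none =>
      by_cases hlt : i - index < 5 <;> simp [hlt]
    | some ch =>
      subst hs
      have hik : i - index = (((i - index).toNat : Nat) : Int) := by omega
      set k := (i - index).toNat with hkdef
      have hk5 : k ≤ 5 := by omega
      interval_cases k
      · -- state 0, expecting 'S'
        by_cases hc : ch = 'S'
        · subst hc
          have e1 : (kwA_table.getD 0 []).getD (kwA_inputstate 'S') 6 = 1 := by decide
          have e2 : PySem.List.pyGet? ("START".toList) ((0 : Nat) : Int) = some 'S' := by decide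
          rw [hik, e2]
          simp only []
          rw [e1]
          norm_num
          exact ih (i + 1) 1 (by omega) (by omega) (by omega)
        · have e2 : PySem.List.pyGet? ("START".toList) ((0 : Nat) : Int) = some 'S' := by decide
          rw [hik, e2]
          simp only []
          rw [kwA_step0 ch hc]
          simp [hc]
      · -- state 1, expecting 'T'
        by_cases hc : ch = 'T'
        · subst hc
          have e1 : (kwA_table.getD 1 []).getD (kwA_inputstate 'T') 6 = 2 := by decide
          have e2 : PySem.List.pyGet? ("START".toList) ((1 : Nat) : Int) = some 'T' := by decide
          rw [hik, e2]
          simp only []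
          rw [e1]
          norm_num
          exact ih (i + 1) 2 (by omega) (by omega) (by omega)
        · have e2 : PySem.List.pyGet? ("START".toList) ((1 : Nat) : Int) = some 'T' := by decide
          rw [hik, e2]
          simp only []
          rw [kwA_step1 ch hc]
          simp [hc]
      · -- state 2, expecting 'A'
        by_cases hc : ch = 'A'
        · subst hc
          have e1 : (kwA_table.getD 2 []).getD (kwA_inputstate 'A') 6 = 3 := by decide
          have e2 : PySem.List.pyGet? ("START".toList) ((2 : Nat) : Int) = some 'A' := by decide
          rw [hik, e2]
          simp only []
          rw [e1]
          norm_num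
          exact ih (i + 1) 3 (by omega) (by omega) (by omega)
        · have e2 : PySem.List.pyGet? ("START".toList) ((2 : Nat) : Int) = some 'A' := by decide
          rw [hik, e2]
          simp only []
          rw [kwA_step2 ch hc]
          simp [hc]
      · -- state 3, expecting 'R'
        by_cases hc : ch = 'R'
        · subst hc
          have e1 : (kwA_table.getD 3 []).getD (kwA_inputstate 'R') 6 = 4 := by decide
          have e2 : PySem.List.pyGet? ("START".toList) ((3 : Nat) : Int) = some 'R' := by decide
          rw [hik, e2]
          simp only []
          rw [e1]
          norm_num
          exact ih (i + 1) 4 (by omega) (by omega) (by omega)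
        · have e2 : PySem.List.pyGet? ("START".toList) ((3 : Nat) : Int) = some 'R' := by decide
          rw [hik, e2]
          simp only []
          rw [kwA_step3 ch hc]
          simp [hc]
      · -- state 4, expecting 'T'
        by_cases hc : ch = 'T'
        · subst hc
          have e1 : (kwA_table.getD 4 []).getD (kwA_inputstate 'T') 6 = 5 := by decide
          have e2 : PySem.List.pyGet? ("START".toList) ((4 : Nat) : Int) = some 'T' := by decide
          rw [hik, e2]
          simp only []
          rw [e1]
          norm_num
          exact ih (i + 1) 5 (by omega) (by omega) (by omega)
        · have e2 : PySem.List.pyGet? ("START".toList) ((4 : Nat) : Int) = some 'T' := by decide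
          rw [hik, e2]
          simp only []
          rw [kwA_step4 ch hc]
          simp [hc]
      · -- state 5: A's table is dead in every input class; B stops at i - index = 5
        rw [hik]
        simp only []
        rw [kwA_step5 ch]
        norm_num

-- ===== VERDICT (by name: the statement is the Claim_ definition above) =====
theorem kwstart_fsm_spec : Claim_equal_kwstart_fsm := by
  intro s index _ _
  unfold Spec_kwstart_fsm kwstart_fsm kwstart_fsm_alt
  exact kw_loop_eq s.toList (PySem.Str.len s) index _ index 0 (by omega) (by omega) (by omega)
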